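-- pv_equiv track=rewrite | github.com/kianush00/Graphsearch | backend/app/models/srex/binary_expression_tree.py | __get_tuples_to_join_by_underscore
-- ===== SOURCE A (Python) =====
-- def __get_tuples_to_join_by_underscore(tokens: list[str]) -> list[tuple[int, int]]:
--     """
--     This function identifies multi-word query terms in a boolean expression and returns a list of tuples,
--     where each tuple represents the start and end index of a multi-word term in the tokens list.
--
--     Parameters:
--     tokens (list[str]): A list of boolean query tokens. Each token represents a word or a boolean operator.
--
--     Returns:
--     list[tuple[int, int]]: A list of tuples, where each tuple contains the start and end index of a multi-word term.
--     """
--     tuples_to_join_by_underscore: list[tuple[int, int]] = []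
--     start_index: int | None = None
--
--     # Append tuples of index ranges for query terms with more than one word
--     for index, token in enumerate(tokens):
--         if token not in ['AND', 'OR', '(', ')']:  # if token is a term
--             if start_index is None:   # if term is the first one
--                 start_index = index
--         elif start_index is not None:   # if token is an operand or parenthesis after a term
--             if start_index < index - 1:  # the tuple must have a difference greater than zero
--                 tuples_to_join_by_underscore.append((start_index, index - 1))
--             start_index = None
--
--     # Try to append last token elements if they are a multi word term
--     if start_index is not None and (start_index < len(tokens) - 1):
--         tuples_to_join_by_underscore.append((start_index, len(tokens) - 1))
--
--     return tuples_to_join_by_underscore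
-- ===== SOURCE B (Python) =====
-- def __get_tuples_to_join_by_underscore(tokens: list[str]) -> list[tuple[int, int]]:
--     delims = [-1] + [i for i, t in enumerate(tokens) if t in ('AND', 'OR', '(', ')')] + [len(tokens)]
--     return [(p + 1, q - 1) for p, q in zip(delims, delims[1:]) if q - p > 2]
-- ===== Notes on version B (the rewrite author's own statement) =====
-- stated objective: simpler
-- what changed: B replaces A's stateful single pass with a start_index sentinel by a staged formulation: extract all delimiter positions (padded with -1 and len(tokens)), then emit (p+1, q-1) for each consecutive delimiter pair with gap q-p > 2.
import Mathlib
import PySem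

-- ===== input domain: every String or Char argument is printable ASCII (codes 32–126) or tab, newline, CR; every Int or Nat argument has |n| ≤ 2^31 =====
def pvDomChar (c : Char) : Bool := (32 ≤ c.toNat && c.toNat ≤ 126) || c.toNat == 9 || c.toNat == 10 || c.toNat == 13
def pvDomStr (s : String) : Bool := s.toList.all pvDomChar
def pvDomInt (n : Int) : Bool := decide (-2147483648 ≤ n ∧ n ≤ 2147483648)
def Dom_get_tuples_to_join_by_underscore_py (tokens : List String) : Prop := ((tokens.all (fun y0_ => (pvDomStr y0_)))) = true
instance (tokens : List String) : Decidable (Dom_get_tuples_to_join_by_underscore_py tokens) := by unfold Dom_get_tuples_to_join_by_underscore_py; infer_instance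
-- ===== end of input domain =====

-- B replaces A's start_index-sentinel single pass by a staged formulation: collect the
-- delimiter positions (padded with -1 and len(tokens)) and emit one tuple per consecutive
-- delimiter pair whose gap exceeds 2 (objective: simpler, same cost).

-- ===== PORT A =====
def pvIsOp (t : String) : Bool := t == "AND" || t == "OR" || t == "(" || t == ")"

def pvStepA (st : List (Int × Int) × Option Int) (p : Int × String) :
    List (Int × Int) × Option Int :=
  let acc := st.1
  let si := st.2
  let index := p.1
  let token := p.2
  if ¬ pvIsOp token then
    match si with
    | none => (acc, some index)
    | some _ => (acc, si)
  else
    match si with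
    | some s => (if s < index - 1 then acc ++ [(s, index - 1)] else acc, none)
    | none => (acc, none)

def get_tuples_to_join_by_underscore_py (tokens : List String) : List (Int × Int) :=
  let st := (PySem.List.enumerate tokens 0).foldl pvStepA ([], none)
  match st.2 with
  | some s =>
      if s < (tokens.length : Int) - 1 then st.1 ++ [(s, (tokens.length : Int) - 1)] else st.1
  | none => st.1

-- ===== PORT B =====
-- delims = [-1] + [i for i, t in enumerate(tokens) if t in ('AND','OR','(',')')] + [len(tokens)]
-- [(p+1, q-1) for p, q in zip(delims, delims[1:]) if q - p > 2]
def get_tuples_to_join_by_underscore_py_alt (tokens : List String) : List (Int × Int) :=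
  let delims : List Int :=
    (-1) :: ((PySem.List.enumerate tokens 0).filter (fun p => pvIsOp p.2)).map Prod.fst
      ++ [(tokens.length : Int)]
  ((delims.zip delims.tail).filter (fun pq => pq.2 - pq.1 > 2)).map
    (fun pq => (pq.1 + 1, pq.2 - 1))

-- ===== PRECONDITION & SPEC =====
def Spec_get_tuples_to_join_by_underscore_py (tokens : List String) (out : List (Int × Int)) : Prop := out = get_tuples_to_join_by_underscore_py_alt tokens
instance (tokens : List String) (out : List (Int × Int)) : Decidable (Spec_get_tuples_to_join_by_underscore_py tokens out) := by unfold Spec_get_tuples_to_join_by_underscore_py; infer_instance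

-- ===== CLAIM (what is proved, stated in full; the proofs are below) =====
def Claim_equal_get_tuples_to_join_by_underscore_py : Prop := ∀ (tokens : List String), Dom_get_tuples_to_join_by_underscore_py tokens → Spec_get_tuples_to_join_by_underscore_py tokens (get_tuples_to_join_by_underscore_py tokens)

-- ===== LEMMAS AND PROOFS =====

-- the recursive characterisation of A (left-to-right with the open-run start)
def pvAux (i : Int) (si : Option Int) : List String → List (Int × Int)
  | [] =>
      match si with
      | some s => if s < i - 1 then [(s, i - 1)] else []
      | none => []
  | t :: ts =>
      if ¬ pvIsOp t then
        match si with
        | none => pvAux (i + 1) (some i) ts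
        | some _ => pvAux (i + 1) si ts
      else
        match si with
        | some s => (if s < i - 1 then [(s, i - 1)] else []) ++ pvAux (i + 1) none ts
        | none => pvAux (i + 1) none ts

def pvFinalize (e : Int) (st : List (Int × Int) × Option Int) : List (Int × Int) :=
  match st.2 with
  | some s => if s < e - 1 then st.1 ++ [(s, e - 1)] else st.1
  | none => st.1

theorem pvFoldA (ts : List String) : ∀ (i : Int) (acc : List (Int × Int)) (si : Option Int),
    pvFinalize (i + ts.length) ((PySem.List.enumerate ts i).foldl pvStepA (acc, si))
      = acc ++ pvAux i si ts := by
  induction ts with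
  | nil =>
      intro i acc si
      cases si <;> simp [pvFinalize, pvAux] <;> split <;> simp
  | cons t ts ih =>
      intro i acc si
      rw [PySem.List.enumerate_cons]
      simp only [List.foldl_cons]
      have hlen : i + ((t :: ts).length : Int) = (i + 1) + (ts.length : Int) := by
        simp only [List.length_cons]; push_cast; omega
      rw [hlen]
      by_cases hop : pvIsOp t
      · cases si with
        | none => simp [pvStepA, hop, pvAux, ih]
        | some s =>
            by_cases hlt : s < i - 1 <;>
              simp [pvStepA, hop, pvAux, ih, hlt]
      · cases si with
        | none => simp [pvStepA, hop, pvAux, ih]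
        | some s => simp [pvStepA, hop, pvAux, ih]

-- the recursive characterisation of B (previous delimiter p, remaining delimiters, final pad n)
def pvEmit (p : Int) : List Int → Int → List (Int × Int)
  | [], n => if n - p > 2 then [(p + 1, n - 1)] else []
  | d :: ds, n => (if d - p > 2 then [(p + 1, d - 1)] else []) ++ pvEmit d ds n

theorem pvZipEmit (ds : List Int) : ∀ (p n : Int),
    ((((p :: ds ++ [n]).zip (ds ++ [n])).filter (fun pq => pq.2 - pq.1 > 2)).map
        (fun pq => (pq.1 + 1, pq.2 - 1)))
      = pvEmit p ds n := by
  induction ds with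
  | nil =>
      intro p n
      by_cases h : n - p > 2
      · simp [pvEmit, h]
      · simp [pvEmit, h]
  | cons d ds ih =>
      intro p n
      have hzip : ((p :: (d :: ds) ++ [n]).zip ((d :: ds) ++ [n]))
          = (p, d) :: (((d :: ds) ++ [n]).zip (ds ++ [n])) := by
        simp [List.zip]
      rw [hzip]
      by_cases h : d - p > 2
      · simp only [List.filter_cons, List.map_cons, pvEmit, decide_eq_true_eq, h, if_pos]
        rw [← ih d n]
        simp [h]
      · simp only [List.filter_cons, pvEmit, decide_eq_true_eq]
        rw [if_neg h, if_neg h, List.nil_append, ← ih d n]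

theorem pvAuxEmit (ts : List String) : ∀ (i : Int) (si : Option Int),
    pvAux i si ts
      = pvEmit (match si with | none => i - 1 | some s => s - 1)
          (((PySem.List.enumerate ts i).filter (fun p => pvIsOp p.2)).map Prod.fst)
          (i + ts.length) := by
  induction ts with
  | nil =>
      intro i si
      cases si with
      | none =>
          simp only [pvAux, PySem.List.enumerate_nil, List.filter_nil, List.map_nil,
            List.length_nil, Int.natCast_zero, add_zero, pvEmit]
          rw [if_neg (by omega)]
      | some s =>
          simp only [pvAux, PySem.List.enumerate_nil, List.filter_nil, List.map_nil,
            List.length_nil, Int.natCast_zero, add_zero, pvEmit]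
          by_cases h : s < i - 1
          · rw [if_pos h, if_pos (by omega)]
            norm_num
          · rw [if_neg h, if_neg (by omega)]
  | cons t ts ih =>
      intro i si
      rw [PySem.List.enumerate_cons]
      have hlen : i + ((t :: ts).length : Int) = (i + 1) + (ts.length : Int) := by
        simp only [List.length_cons]; push_cast; omega
      rw [hlen]
      by_cases hop : pvIsOp t
      · have hfil : ((((i, t) :: PySem.List.enumerate ts (i + 1)).filter
              (fun p => pvIsOp p.2)).map Prod.fst)
            = i :: ((PySem.List.enumerate ts (i + 1)).filter
              (fun p => pvIsOp p.2)).map Prod.fst := by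
          simp [List.filter_cons, hop]
        rw [hfil]
        cases si with
        | none =>
            have hL : pvAux i none (t :: ts) = pvAux (i + 1) none ts := by
              simp [pvAux, hop]
            rw [hL, ih (i + 1) none]
            simp only [pvEmit]
            rw [if_neg (by omega), List.nil_append]
            norm_num
        | some s =>
            have hL : pvAux i (some s) (t :: ts)
                = (if s < i - 1 then [(s, i - 1)] else []) ++ pvAux (i + 1) none ts := by
              simp [pvAux, hop]
            rw [hL, ih (i + 1) none]
            simp only [pvEmit]
            by_cases h : s < i - 1
            · rw [if_pos h, if_pos (by omega)]
              norm_num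
            · rw [if_neg h, if_neg (by omega), List.nil_append, List.nil_append]
              norm_num
      · have hfil : ((((i, t) :: PySem.List.enumerate ts (i + 1)).filter
              (fun p => pvIsOp p.2)).map Prod.fst)
            = ((PySem.List.enumerate ts (i + 1)).filter
              (fun p => pvIsOp p.2)).map Prod.fst := by
          simp [List.filter_cons, hop]
        rw [hfil]
        cases si with
        | none =>
            have hL : pvAux i none (t :: ts) = pvAux (i + 1) (some i) ts := by
              simp [pvAux, hop]
            rw [hL, ih (i + 1) (some i)]
        | some s =>
            have hL : pvAux i (some s) (t :: ts) = pvAux (i + 1) (some s) ts := by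
              simp [pvAux, hop]
            rw [hL, ih (i + 1) (some s)]

-- ===== VERDICT (by name: the statement is the Claim_ definition above) =====
theorem get_tuples_to_join_by_underscore_py_spec : Claim_equal_get_tuples_to_join_by_underscore_py := by
  intro tokens _
  unfold Spec_get_tuples_to_join_by_underscore_py
  have hA := pvFoldA tokens 0 [] none
  simp only [zero_add, List.nil_append] at hA
  have hE := pvAuxEmit tokens 0 none
  simp only [zero_add] at hE
  have hZ := pvZipEmit
    (((PySem.List.enumerate tokens 0).filter (fun p => pvIsOp p.2)).map Prod.fst)
    (-1) (tokens.length : Int)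
  calc get_tuples_to_join_by_underscore_py tokens
      = pvFinalize (tokens.length : Int)
          ((PySem.List.enumerate tokens 0).foldl pvStepA ([], none)) := rfl
    _ = pvAux 0 none tokens := hA
    _ = pvEmit (-1)
          (((PySem.List.enumerate tokens 0).filter (fun p => pvIsOp p.2)).map Prod.fst)
          (tokens.length : Int) := by rw [hE]; norm_num
    _ = get_tuples_to_join_by_underscore_py_alt tokens := by
          rw [← hZ]; rfl
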